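-- pv_equiv track=rewrite | github.com/elephantatech/moon_traveler | scripts/drone_evolution_gif.py | build_drone
-- ===== SOURCE A (Python) =====
-- def build_drone(upgrade_count: int) -> tuple[str, str]:
--     """Build the drone sprite for a given upgrade count."""
--     eye = "O" if upgrade_count > 0 else " "
--     top = f"[{eye}]--(+)--[{eye}]"
--
--     belly = list("___________")  # 11 chars
--     slots = [0, 9, 2, 7, 4]
--     for i in range(min(upgrade_count, 5)):
--         s = slots[i]
--         belly[s] = "["
--         belly[s + 1] = "]"
--     bottom = "\\" + "".join(belly) + "/"
--
--     return top, bottom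
-- ===== SOURCE B (Python) =====
-- def build_drone(upgrade_count: int) -> tuple[str, str]:
--     eye = "O" if upgrade_count > 0 else " "
--     top = f"[{eye}]--(+)--[{eye}]"
--     slots = [0, 9, 2, 7, 4]
--     starts = set(slots[:max(0, min(upgrade_count, 5))])
--     belly = "".join(
--         "[" if p in starts else "]" if (p - 1) in starts else "_"
--         for p in range(11)
--     )
--     return top, "\\" + belly + "/"
-- ===== Notes on version B (the rewrite author's own statement) =====
-- stated objective: alternative
-- what changed: B builds the belly in one pass over the output positions with a precomputed set of active start slots, instead of mutating a char list per upgrade as A does.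
import Mathlib
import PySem

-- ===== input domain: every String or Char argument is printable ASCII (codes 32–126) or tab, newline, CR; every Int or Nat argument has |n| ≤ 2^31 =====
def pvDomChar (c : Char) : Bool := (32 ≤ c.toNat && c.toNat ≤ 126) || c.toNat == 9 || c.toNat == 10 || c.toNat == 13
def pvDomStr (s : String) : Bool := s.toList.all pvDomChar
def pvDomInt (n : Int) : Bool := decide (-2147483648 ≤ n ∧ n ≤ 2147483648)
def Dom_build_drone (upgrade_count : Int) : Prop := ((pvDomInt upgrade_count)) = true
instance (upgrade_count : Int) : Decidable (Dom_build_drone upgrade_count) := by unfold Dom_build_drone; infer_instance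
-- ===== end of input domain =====

-- B builds the belly in one pass over the output positions with a precomputed set of
-- active start slots, instead of mutating a char list once per upgrade as A does (alternative
-- decomposition; same cost). Both are total; no side effects.

-- ===== PORT A =====
def build_drone (upgrade_count : Int) : String × String :=
  let eye := if upgrade_count > 0 then "O" else " "
  let top := "[" ++ eye ++ "]--(+)--[" ++ eye ++ "]"
  let belly0 : List Char := "___________".toList
  let slots : List Int := [0, 9, 2, 7, 4]
  let belly := (PySem.List.pyRange 0 (min upgrade_count 5) 1).foldl
    (fun b i =>
      let s := PySem.List.pyGetD slots i 0   -- i ∈ [0,5), always in range for slots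
      let b := PySem.List.pySetD b s '['     -- belly[s] = "["
      PySem.List.pySetD b (s + 1) ']')       -- belly[s+1] = "]"
    belly0
  let bottom := "\\" ++ String.ofList belly ++ "/"
  (top, bottom)

-- ===== PORT B =====
def build_drone_alt (upgrade_count : Int) : String × String :=
  let eye := if upgrade_count > 0 then "O" else " "
  let top := "[" ++ eye ++ "]--(+)--[" ++ eye ++ "]"
  let slots : List Int := [0, 9, 2, 7, 4]
  let starts : PySem.Set Int :=
    PySem.Set.ofList (PySem.List.slice slots none (some (max 0 (min upgrade_count 5))))
  let belly := String.ofList ((PySem.List.pyRange 0 11 1).map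
    (fun p => if p ∈ starts then '[' else if (p - 1) ∈ starts then ']' else '_'))
  (top, "\\" ++ belly ++ "/")

-- ===== PRECONDITION & SPEC =====
def Spec_build_drone (upgrade_count : Int) (out : String × String) : Prop := out = build_drone_alt upgrade_count
instance (upgrade_count : Int) (out : String × String) : Decidable (Spec_build_drone upgrade_count out) := by unfold Spec_build_drone; infer_instance

-- ===== CLAIM (what is proved, stated in full; the proofs are below) =====
def Claim_equal_build_drone : Prop := ∀ (upgrade_count : Int), Dom_build_drone upgrade_count → Spec_build_drone upgrade_count (build_drone upgrade_count)

-- ===== LEMMAS AND PROOFS =====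

-- Both ports depend on upgrade_count only through (upgrade_count > 0) and min upgrade_count 5.
theorem build_drone_le_zero (u : Int) (h : u ≤ 0) : build_drone u = build_drone 0 := by
  simp only [build_drone]
  have h1 : ¬ (u > 0) := by omega
  rw [PySem.List.pyRange_one_eq_nil (by omega), PySem.List.pyRange_one_eq_nil (by omega)]
  simp [h1]

theorem build_drone_alt_le_zero (u : Int) (h : u ≤ 0) : build_drone_alt u = build_drone_alt 0 := by
  simp only [build_drone_alt]
  have h1 : ¬ (u > 0) := by omega
  have h2 : max 0 (min u 5) = 0 := by omega
  rw [h2]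
  simp [h1]

theorem build_drone_ge_five (u : Int) (h : 5 ≤ u) : build_drone u = build_drone 5 := by
  simp only [build_drone]
  have h1 : u > 0 := by omega
  have h2 : min u 5 = 5 := by omega
  rw [h2]
  simp [h1]

theorem build_drone_alt_ge_five (u : Int) (h : 5 ≤ u) : build_drone_alt u = build_drone_alt 5 := by
  simp only [build_drone_alt]
  have h1 : u > 0 := by omega
  have h2 : max 0 (min u 5) = 5 := by omega
  rw [h2]
  simp [h1]

-- ===== VERDICT (by name: the statement is the Claim_ definition above) =====
theorem build_drone_spec : Claim_equal_build_drone := by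
  intro u _
  unfold Spec_build_drone
  by_cases h : u ≤ 0
  · rw [build_drone_le_zero u h, build_drone_alt_le_zero u h]; decide
  · by_cases h5 : u < 5
    · have h0 : 0 < u := by omega
      interval_cases u <;> decide
    · rw [build_drone_ge_five u (by omega), build_drone_alt_ge_five u (by omega)]; decide
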